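-- pv_equiv track=rewrite | github.com/irmakkoc/movie_recommendation | app.py | get_therapy_tag
-- ===== SOURCE A (Python) =====
-- def get_therapy_tag(emotion_category, genres):
--     """Determine the appropriate therapy tag based on emotion category and genres"""
--     if emotion_category == "happy":
--         return "🌤️ To lift your spirits"
--     elif emotion_category == "angry":
--         return "😌 To feel calmer"
--     elif emotion_category == "fearful":
--         return "💪 To confront fear"
--     elif emotion_category == "surprised":
--         return "🎭 For a new perspective"  # New tag for surprised emotion
--     elif emotion_category == "sad":
--         # Check if the movie has comedy or family genres
--         if any(genre in ["Comedy", "Family"] for genre in genres):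
--             return "🌤️ To lift your spirits"
--         # For romance and drama
--         elif any(genre in ["Romance", "Drama"] for genre in genres):
--             return "💧 For catharsis"
--         # Default for other genres
--         return "💧 For catharsis"
--     elif emotion_category == "bad":
--         # Check if the movie has comedy genre
--         if "Comedy" in genres:
--             return "🌤️ To lift your spirits"
--         # For drama, history, and war
--         elif any(genre in ["Drama", "History", "War"] for genre in genres):
--             return "💧 For catharsis"
--         # Default for other genres
--         return "💧 For catharsis"
--     else:  # neutral
--         return "🎬 For entertainment"
-- ===== SOURCE B (Python) =====
-- SIMPLE_TAGS = {
--     "happy": "🌤️ To lift your spirits",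
--     "angry": "😌 To feel calmer",
--     "fearful": "💪 To confront fear",
--     "surprised": "🎭 For a new perspective",
-- }
--
-- def get_therapy_tag(emotion_category, genres):
--     tag = SIMPLE_TAGS.get(emotion_category)
--     if tag is not None:
--         return tag
--     if emotion_category == "sad":
--         return "🌤️ To lift your spirits" if set(genres) & {"Comedy", "Family"} else "💧 For catharsis"
--     if emotion_category == "bad":
--         return "🌤️ To lift your spirits" if "Comedy" in genres else "💧 For catharsis"
--     return "🎬 For entertainment"
-- ===== Notes on version B (the rewrite author's own statement) =====
-- stated objective: simpler
-- what changed: Replaces the seven-branch if/elif chain with a dict dispatch for the four fixed emotions, collapses the dead romance/drama elif in 'sad' (and the dead drama/history/war elif in 'bad') since they return the same catharsis default, and tests sad's genres via a set intersection instead of a generator scan.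
import Mathlib
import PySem

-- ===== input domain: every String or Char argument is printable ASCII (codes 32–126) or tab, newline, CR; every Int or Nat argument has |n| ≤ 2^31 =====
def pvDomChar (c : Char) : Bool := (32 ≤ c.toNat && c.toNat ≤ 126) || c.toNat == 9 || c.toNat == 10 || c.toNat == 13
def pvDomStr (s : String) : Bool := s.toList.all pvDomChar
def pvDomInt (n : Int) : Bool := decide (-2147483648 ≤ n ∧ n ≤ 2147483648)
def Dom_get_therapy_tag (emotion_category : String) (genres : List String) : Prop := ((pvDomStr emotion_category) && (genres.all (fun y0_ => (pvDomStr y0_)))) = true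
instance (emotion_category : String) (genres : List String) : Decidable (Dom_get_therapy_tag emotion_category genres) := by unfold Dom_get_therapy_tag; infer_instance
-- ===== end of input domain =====

-- ===== PORT A =====
-- Literal port of A's if/elif chain; any(genre in [...]) is List.any with list membership.
def get_therapy_tag (emotion_category : String) (genres : List String) : String :=
  if emotion_category = "happy" then "🌤️ To lift your spirits"
  else if emotion_category = "angry" then "😌 To feel calmer"
  else if emotion_category = "fearful" then "💪 To confront fear"
  else if emotion_category = "surprised" then "🎭 For a new perspective"
  else if emotion_category = "sad" then
    if genres.any (fun genre => ["Comedy", "Family"].contains genre) then "🌤️ To lift your spirits"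
    else if genres.any (fun genre => ["Romance", "Drama"].contains genre) then "💧 For catharsis"
    else "💧 For catharsis"
  else if emotion_category = "bad" then
    if genres.contains "Comedy" then "🌤️ To lift your spirits"
    else if genres.any (fun genre => ["Drama", "History", "War"].contains genre) then "💧 For catharsis"
    else "💧 For catharsis"
  else "🎬 For entertainment"

-- ===== PORT B =====
-- B: dict dispatch for the four fixed emotions, set intersection for 'sad', one default.
def simpleTags : PySem.Dict String String :=
  PySem.Dict.ofList [("happy", "🌤️ To lift your spirits"), ("angry", "😌 To feel calmer"),
    ("fearful", "💪 To confront fear"), ("surprised", "🎭 For a new perspective")]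

def get_therapy_tag_alt (emotion_category : String) (genres : List String) : String :=
  match PySem.Dict.get? simpleTags emotion_category with
  | some tag => tag
  | none =>
    if emotion_category = "sad" then
      if PySem.Set.inter (PySem.Set.ofList genres) ["Comedy", "Family"] ≠ [] then
        "🌤️ To lift your spirits"
      else "💧 For catharsis"
    else if emotion_category = "bad" then
      if genres.contains "Comedy" then "🌤️ To lift your spirits" else "💧 For catharsis"
    else "🎬 For entertainment"

-- ===== PRECONDITION & SPEC =====
def Spec_get_therapy_tag (emotion_category : String) (genres : List String) (out : String) : Prop := out = get_therapy_tag_alt emotion_category genres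
instance (emotion_category : String) (genres : List String) (out : String) : Decidable (Spec_get_therapy_tag emotion_category genres out) := by unfold Spec_get_therapy_tag; infer_instance

-- ===== CLAIM (what is proved, stated in full; the proofs are below) =====
def Claim_equal_get_therapy_tag : Prop := ∀ (emotion_category : String) (genres : List String), Dom_get_therapy_tag emotion_category genres → Spec_get_therapy_tag emotion_category genres (get_therapy_tag emotion_category genres)

-- ===== LEMMAS AND PROOFS =====
-- set(genres) & {"Comedy","Family"} is nonempty iff some genre is Comedy or Family.
theorem inter_ne_nil_iff_any (genres : List String) :
    (PySem.Set.inter (PySem.Set.ofList genres) ["Comedy", "Family"] ≠ []) ↔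
      genres.any (fun genre => ["Comedy", "Family"].contains genre) = true := by
  rw [← List.isEmpty_eq_false_iff, List.isEmpty_eq_false_iff_exists_mem]
  simp [PySem.Set.mem_inter, PySem.Set.mem_ofList, List.any_eq_true]

theorem simpleTags_get?_none (e : String) (h1 : e ≠ "happy") (h2 : e ≠ "angry")
    (h3 : e ≠ "fearful") (h4 : e ≠ "surprised") :
    PySem.Dict.get? simpleTags e = none := by
  have hs : simpleTags.items = [("happy", "🌤️ To lift your spirits"), ("angry", "😌 To feel calmer"),
      ("fearful", "💪 To confront fear"), ("surprised", "🎭 For a new perspective")] := rfl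
  simp [PySem.Dict.get?, hs, Ne.symm h1, Ne.symm h2, Ne.symm h3, Ne.symm h4]

-- ===== VERDICT (by name: the statement is the Claim_ definition above) =====
theorem get_therapy_tag_spec : Claim_equal_get_therapy_tag := by
  intro e genres _
  unfold Spec_get_therapy_tag get_therapy_tag get_therapy_tag_alt
  by_cases h1 : e = "happy"; · subst h1; rfl
  by_cases h2 : e = "angry"; · subst h2; rfl
  by_cases h3 : e = "fearful"; · subst h3; rfl
  by_cases h4 : e = "surprised"; · subst h4; rfl
  rw [simpleTags_get?_none e h1 h2 h3 h4]
  simp only [if_neg h1, if_neg h2, if_neg h3, if_neg h4]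
  by_cases h5 : e = "sad"
  · simp only [h5, if_pos]
    rcases Decidable.em (PySem.Set.inter (PySem.Set.ofList genres) ["Comedy", "Family"] ≠ []) with h | h
    · rw [if_pos ((inter_ne_nil_iff_any genres).mp h), if_pos h]
    · rw [if_neg (fun ha => h ((inter_ne_nil_iff_any genres).mpr ha)), if_neg h]
      split <;> rfl
  · simp only [if_neg h5]
    by_cases h6 : e = "bad"
    · simp only [h6, if_pos]
      split
      · rfl
      · split <;> rfl
    · simp only [if_neg h6]
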